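-- pv_equiv track=rewrite | github.com/aidecentralized/sonar | src/main_exp.py | get_domain_support
-- ===== SOURCE A (Python) =====
-- from typing import Dict, List
--
-- def get_domain_support(
--     num_users: int, base: str, domains: List[int] | List[str]
-- ) -> Dict[str, str]:
--     assert num_users % len(domains) == 0
--
--     users_per_domain = num_users // len(domains)
--     support: Dict[str, str] = {}
--     support["0"] = f"{base}_{domains[0]}"
--     for i in range(1, num_users + 1):
--         support[str(i)] = f"{base}_{domains[(i-1) // users_per_domain]}"
--     return support
-- ===== SOURCE B (Python) =====
-- def get_domain_support(num_users, base, domains):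
--     assert num_users % len(domains) == 0
--
--     users_per_domain = num_users // len(domains)
--     pairs = [("0", f"{base}_{domains[0]}")]
--     for d, dom in enumerate(domains):
--         val = f"{base}_{dom}"
--         pairs.extend((str(d * users_per_domain + off + 1), val)
--                      for off in range(users_per_domain))
--     return dict(pairs)
-- ===== Notes on version B (the rewrite author's own statement) =====
-- stated objective: alternative
-- what changed: B builds the result as a flat (key, value) pair list -- the '0' pair followed by one contiguous block of pairs per domain via enumerate, with each domain's value string formatted once -- and converts it to a dict at the end, instead of A's per-user dict-insert loop that divides (i-1)//users_per_domain and formats the value string for every user.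
import Mathlib
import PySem

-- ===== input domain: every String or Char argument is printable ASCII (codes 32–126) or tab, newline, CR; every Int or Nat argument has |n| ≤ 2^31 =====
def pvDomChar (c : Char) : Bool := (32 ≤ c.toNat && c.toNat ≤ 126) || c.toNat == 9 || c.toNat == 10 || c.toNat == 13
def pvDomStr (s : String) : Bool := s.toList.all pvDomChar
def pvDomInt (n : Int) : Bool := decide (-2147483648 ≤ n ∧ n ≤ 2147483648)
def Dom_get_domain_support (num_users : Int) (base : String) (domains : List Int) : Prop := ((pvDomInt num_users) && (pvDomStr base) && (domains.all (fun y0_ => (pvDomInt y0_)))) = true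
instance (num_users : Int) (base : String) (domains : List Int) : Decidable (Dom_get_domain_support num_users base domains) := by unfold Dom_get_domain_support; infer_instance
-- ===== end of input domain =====

-- B builds the (key, value) pair list directly — one block of pairs per domain via
-- enumerate, extended into a flat list, then turned into a dict at the end — instead of
-- A's per-user dict-insert loop with a division per user; objective: alternative.

-- ===== PORT A =====
-- per-user loop: support[str(i)] = f"{base}_{domains[(i-1)//users_per_domain]}"
def get_domain_support (num_users : Int) (base : String) (domains : List Int) : List (String × String) :=
  let users_per_domain := PySem.Int.floordiv num_users (domains.length : Int)
  let support : PySem.Dict String String := PySem.Dict.empty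
  let support := support.insert "0" (base ++ "_" ++ PySem.Int.toStr (PySem.List.pyGetD domains 0 0))
  let support := (PySem.List.pyRange 1 (num_users + 1) 1).foldl
    (fun s i => s.insert (PySem.Int.toStr i)
      (base ++ "_" ++ PySem.Int.toStr (PySem.List.pyGetD domains (PySem.Int.floordiv (i - 1) users_per_domain) 0))) support
  support.items

-- ===== PORT B =====
-- pair-list construction: the "0" pair, then for (d, dom) in enumerate(domains) extend
-- with that domain's block of (str(d*upd+off+1), val) pairs; dict(pairs) at the end
def get_domain_support_alt (num_users : Int) (base : String) (domains : List Int) : List (String × String) :=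
  let users_per_domain := PySem.Int.floordiv num_users (domains.length : Int)
  let pairs : List (String × String) :=
    ("0", base ++ "_" ++ PySem.Int.toStr (PySem.List.pyGetD domains 0 0)) ::
      (PySem.List.enumerate domains).flatMap (fun p =>
        let val := base ++ "_" ++ PySem.Int.toStr p.2
        (PySem.List.pyRange 0 users_per_domain 1).map
          (fun off => (PySem.Int.toStr (p.1 * users_per_domain + off + 1), val)))
  (PySem.Dict.ofList pairs).items

-- ===== PRECONDITION & SPEC =====
-- Pre_ excludes exactly the inputs where A raises: empty domains (ZeroDivisionError on %)
-- and num_users not a multiple of len(domains) (AssertionError).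
def Pre_get_domain_support (num_users : Int) (base : String) (domains : List Int) : Prop :=
  domains ≠ [] ∧ PySem.Int.mod num_users (domains.length : Int) = 0
instance (num_users : Int) (base : String) (domains : List Int) : Decidable (Pre_get_domain_support num_users base domains) := by unfold Pre_get_domain_support; infer_instance
def pvWitness_get_domain_support : Int × String × List Int := (4, "b", [1, 2])

def Spec_get_domain_support (num_users : Int) (base : String) (domains : List Int) (out : List (String × String)) : Prop := out = get_domain_support_alt num_users base domains
instance (num_users : Int) (base : String) (domains : List Int) (out : List (String × String)) : Decidable (Spec_get_domain_support num_users base domains out) := by unfold Spec_get_domain_support; infer_instance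

-- ===== CLAIM (what is proved, stated in full; the proofs are below) =====
def Claim_equal_get_domain_support : Prop := ∀ (num_users : Int) (base : String) (domains : List Int), Dom_get_domain_support num_users base domains → Pre_get_domain_support num_users base domains → Spec_get_domain_support num_users base domains (get_domain_support num_users base domains)

-- ===== LEMMAS AND PROOFS =====

-- value of a decimal digit list, used to invert Nat.toDigits
def pvVal (cs : List Char) : Nat := cs.foldl (fun a c => a * 10 + (c.toNat - 48)) 0

theorem pv_toDigitsCore_append : ∀ (fuel n : Nat) (ds : List Char),
    Nat.toDigitsCore 10 fuel n ds = Nat.toDigitsCore 10 fuel n [] ++ ds := by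
  intro fuel
  induction fuel with
  | zero => intro n ds; rfl
  | succ f ih =>
    intro n ds
    simp only [Nat.toDigitsCore]
    split_ifs with h
    · rfl
    · rw [ih (n / 10) (Nat.digitChar (n % 10) :: ds), ih (n / 10) [Nat.digitChar (n % 10)]]
      simp

theorem pv_digitChar_val (k : Nat) (h : k < 10) : (Nat.digitChar k).toNat - 48 = k := by
  interval_cases k <;> decide

theorem pv_val_toDigitsCore : ∀ (fuel n : Nat), n < fuel →
    pvVal (Nat.toDigitsCore 10 fuel n []) = n := by
  intro fuel
  induction fuel with
  | zero => intro n h; omega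
  | succ f ih =>
    intro n h
    simp only [Nat.toDigitsCore]
    split_ifs with h10
    · have hn10 : n < 10 := by omega
      have hmodn : n % 10 = n := by omega
      simp [pvVal, hmodn, pv_digitChar_val n hn10]
    · have hf : n / 10 < f := by
        have h1 : 0 < n := by omega
        have := Nat.div_lt_self h1 (by norm_num : 1 < 10)
        omega
      rw [pv_toDigitsCore_append f (n / 10) [Nat.digitChar (n % 10)]]
      simp only [pvVal, List.foldl_append, List.foldl_cons, List.foldl_nil]
      have : pvVal (Nat.toDigitsCore 10 f (n / 10) []) = n / 10 := ih (n / 10) hf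
      rw [pvVal] at this
      rw [this, pv_digitChar_val (n % 10) (Nat.mod_lt n (by omega))]
      omega

theorem pv_val_toDigits (n : Nat) : pvVal (Nat.toDigits 10 n) = n :=
  pv_val_toDigitsCore (n + 1) n (Nat.lt_succ_self n)

theorem pv_toStr_inj {a b : Int} (ha : 0 ≤ a) (hb : 0 ≤ b)
    (h : PySem.Int.toStr a = PySem.Int.toStr b) : a = b := by
  have h2 : PySem.Int.toChars a = PySem.Int.toChars b := by
    rw [← PySem.Int.toList_toStr, ← PySem.Int.toList_toStr, h]
  unfold PySem.Int.toChars at h2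
  rw [if_neg (by omega), if_neg (by omega)] at h2
  have h3 : a.toNat = b.toNat := by
    have := congrArg pvVal h2
    rwa [pv_val_toDigits, pv_val_toDigits] at this
  omega

theorem pv_toStr_ne_zero {i : Int} (hi : 1 ≤ i) : PySem.Int.toStr i ≠ "0" := by
  intro h
  have : PySem.Int.toStr i = PySem.Int.toStr 0 := by rw [h]; decide
  have := pv_toStr_inj (by omega) (by norm_num) this
  omega

-- splitting range(1, m*upd + 1) into m consecutive blocks of length upd
theorem pv_block_decomp {σ : Type} (upd : Int) (hu : 0 < upd)
    (f : Int → σ) (g : Int → Int → σ)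
    (hfg : ∀ d off : Int, 0 ≤ d → 0 ≤ off → off < upd → f (d * upd + off + 1) = g d off) :
    ∀ m : Nat, (PySem.List.pyRange 1 ((m : Int) * upd + 1) 1).map f
      = (PySem.List.pyRange 0 (m : Int) 1).flatMap
          (fun d => (PySem.List.pyRange 0 upd 1).map (g d)) := by
  intro m
  induction m with
  | zero =>
    simp [PySem.List.pyRange_one_eq_nil]
  | succ k ih =>
    have hk0 : (0 : Int) ≤ (k : Int) * upd := by positivity
    have h1 : (1 : Int) ≤ (k : Int) * upd + 1 := by omega
    rw [show (((k + 1 : Nat)) : Int) = (k : Int) + 1 by push_cast; ring]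
    have hsplit := PySem.List.pyRange_one_append 1 ((k : Int) * upd + 1)
      (((k : Int) + 1) * upd + 1) h1 (by nlinarith)
    have houter := PySem.List.pyRange_one_succ_right
      (show (0 : Int) ≤ (k : Int) by exact_mod_cast Nat.cast_nonneg k)
    rw [hsplit, houter, List.map_append, List.flatMap_append, ih]
    congr 1
    · simp only [List.flatMap_cons, List.flatMap_nil, List.append_nil]
      rw [PySem.List.pyRange_one ((k : Int) * upd + 1) (((k : Int) + 1) * upd + 1),
          PySem.List.pyRange_one 0 upd]
      have hlen : ((((k : Int) + 1) * upd + 1) - ((k : Int) * upd + 1)).toNat = (upd - 0).toNat := by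
        congr 1; ring
      rw [hlen, List.map_map, List.map_map]
      apply List.map_congr_left
      intro j hj
      have hjlt : (j : Int) < upd := by
        have := List.mem_range.mp hj
        omega
      simp only [Function.comp_apply]
      have : (k : Int) * upd + 1 + (j : Int) = (k : Int) * upd + (j : Int) + 1 := by ring
      rw [this, hfg (k : Int) (j : Int) (by positivity) (by positivity) hjlt]
      simp

-- ===== VERDICT (by name: the statement is the Claim_ definition above) =====
theorem get_domain_support_spec : Claim_equal_get_domain_support := by
  intro n base domains _ hpre
  obtain ⟨hne, hmod⟩ := hpre
  unfold Spec_get_domain_support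
  simp only [get_domain_support, get_domain_support_alt]
  have hL : (0 : Int) < (domains.length : Int) := by
    have : domains.length ≠ 0 := by simpa using List.length_pos_iff.mpr hne |>.ne'
    exact_mod_cast Nat.pos_of_ne_zero this
  set upd := PySem.Int.floordiv n (domains.length : Int) with hupd
  set v0 := base ++ "_" ++ PySem.Int.toStr (PySem.List.pyGetD domains 0 0) with hv0
  have hn : upd * (domains.length : Int) = n := by
    have := PySem.Int.floordiv_mul_add_mod n (domains.length : Int)
    rw [hmod] at this; simp only [hupd]; omega
  -- the per-user key/value list A inserts
  set valA : Int → String := fun i =>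
    base ++ "_" ++ PySem.Int.toStr (PySem.List.pyGetD domains (PySem.Int.floordiv (i - 1) upd) 0)
    with hvalA
  set listK : List (String × String) :=
    (PySem.List.pyRange 1 (n + 1) 1).map (fun i => (PySem.Int.toStr i, valA i)) with hlistK
  -- A's dict: "0" first, then a fold over fresh distinct keys ⇒ items append
  have hFresh : ∀ i ∈ PySem.List.pyRange 1 (n + 1) 1,
      ((PySem.Dict.empty : PySem.Dict String String).insert "0" v0).contains
        (PySem.Int.toStr i) = false := by
    intro i hi
    have hi1 : 1 ≤ i := (PySem.List.mem_pyRange_one.mp hi).1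
    rw [PySem.Dict.contains_insert, PySem.Dict.contains_empty]
    simp [pv_toStr_ne_zero hi1]
  have hNodupKeys : ((PySem.List.pyRange 1 (n + 1) 1).map PySem.Int.toStr).Nodup := by
    refine List.Nodup.map_on ?_ (PySem.List.nodup_pyRange_one 1 (n + 1))
    intro x hx y hy hxy
    exact pv_toStr_inj (by have := (PySem.List.mem_pyRange_one.mp hx).1; omega)
      (by have := (PySem.List.mem_pyRange_one.mp hy).1; omega) hxy
  have hA : ((PySem.List.pyRange 1 (n + 1) 1).foldl
        (fun s i => s.insert (PySem.Int.toStr i) (valA i))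
        (((PySem.Dict.empty : PySem.Dict String String)).insert "0" v0)).items
      = ("0", v0) :: listK := by
    rw [PySem.Dict.items_foldl_insert_fresh (PySem.List.pyRange 1 (n + 1) 1)
      PySem.Int.toStr valA _ hFresh hNodupKeys]
    rfl
  rw [hA]
  -- B's pair list equals ("0", v0) :: listK
  have hPairs : (("0", v0) ::
      (PySem.List.enumerate domains).flatMap (fun p =>
        (PySem.List.pyRange 0 upd 1).map
          (fun off => (PySem.Int.toStr (p.1 * upd + off + 1),
            base ++ "_" ++ PySem.Int.toStr p.2))))
      = ("0", v0) :: listK := by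
    congr 1
    rw [PySem.List.enumerate_eq_map_pyRange domains 0, List.flatMap_map]
    by_cases hpos : 0 < upd
    · rw [hlistK, show n + 1 = ((domains.length : Nat) : Int) * upd + 1 by
        rw [mul_comm]; omega]
      rw [pv_block_decomp upd hpos
        (fun i => (PySem.Int.toStr i, valA i))
        (fun d off => (PySem.Int.toStr (d * upd + off + 1),
          base ++ "_" ++ PySem.Int.toStr (PySem.List.pyGetD domains d 0)))
        (by
          intro d off hd hoff hlt
          have hfl : PySem.Int.floordiv (d * upd + off) upd = d := by
            rw [PySem.Int.floordiv_eq_iff_of_pos hpos]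
            constructor <;> nlinarith
          simp [hvalA, hfl])
        domains.length]
      rfl
    · have hB : PySem.List.pyRange 0 upd 1 = [] :=
        PySem.List.pyRange_one_eq_nil (le_of_not_gt hpos)
      have hAnil : PySem.List.pyRange 1 (n + 1) 1 = [] := by
        apply PySem.List.pyRange_one_eq_nil
        nlinarith [le_of_not_gt hpos]
      simp [hlistK, hAnil, hB]
  rw [hPairs]
  -- dict(pairs) over nodup keys keeps the pair list as its items
  have hNodupAll : ((("0", v0) :: listK).map Prod.fst).Nodup := by
    simp only [List.map_cons, List.nodup_cons]
    constructor
    · intro hmem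
      rw [hlistK, List.map_map] at hmem
      obtain ⟨i, hi, hkey⟩ := List.mem_map.mp hmem
      have hi1 : 1 ≤ i := (PySem.List.mem_pyRange_one.mp hi).1
      exact pv_toStr_ne_zero hi1 hkey
    · rw [hlistK, List.map_map]
      exact hNodupKeys
  have hFreshAll : ∀ p ∈ ("0", v0) :: listK,
      (PySem.Dict.empty : PySem.Dict String String).contains p.1 = false := by
    intro p _; exact PySem.Dict.contains_empty p.1
  show (("0", v0) :: listK) = (PySem.Dict.ofList (("0", v0) :: listK)).items
  unfold PySem.Dict.ofList PySem.Dict.update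
  rw [show (fun (acc : PySem.Dict String String) (p : String × String) =>
        acc.insert p.1 p.2) = (fun acc p => acc.insert (Prod.fst p) (Prod.snd p)) from rfl]
  rw [PySem.Dict.items_foldl_insert_fresh (("0", v0) :: listK) Prod.fst Prod.snd
    PySem.Dict.empty hFreshAll hNodupAll]
  simp [show (PySem.Dict.empty : PySem.Dict String String).items = [] from rfl]
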